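-- pv_equiv track=rewrite | github.com/kingbirdogd/AlgoChallenge | MaxSumOfRemovedKConnerItemsFromMatrixRow/solution.py | MaxSumOfRemovedKConnerItemsFromMatrixRow
-- ===== SOURCE A (Python) =====
-- def MaxSelectedKCornerItemItemFromArray(v, remove_item):
--     windows_size = len(v) - remove_item
--     current_windows_size = 0
--     sum_all = 0
--     windows_sum = 0
--     min_windows_sum = 0
--     for i in range(0, len(v)):
--         sum_all += v[i]
--         windows_sum += v[i]
--         current_windows_size += 1
--         if current_windows_size == windows_size:
--             min_windows_sum = windows_sum
--         elif current_windows_size > windows_size: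
--             windows_sum -= v[i - windows_size]
--             if windows_sum < min_windows_sum:
--                 min_windows_sum = windows_sum
--     return sum_all - min_windows_sum
--
-- def MaxSumOfRemovedKConnerItemsFromMatrixRow(matrix, k):
--     rows = len(matrix)
--     if 0 == rows:
--         return 0
--     columns = len(matrix[0])
--     if 0 == columns:
--         return 0
--     if k > rows * columns:
--         raise Exception("Operation large than the total item of matrix")
--     operate_max_sum_matrix =[]
--     max_select_item_each_row = min(columns, k)
--     for i in range(0, rows):
--         operate_max_sum_row = []
--         for j in range(0,max_select_item_each_row):
--             operate_max_sum_row.append(MaxSelectedKCornerItemItemFromArray(matrix[i], j + 1))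
--         operate_max_sum_matrix.append(operate_max_sum_row);
--     dp = [0] * (k + 1)
--     for i in range(0, len(operate_max_sum_matrix)):
--         for bag_weigth_reverse_idx in range(0,k):
--             bag_weigth = k - bag_weigth_reverse_idx
--             for weigth_idx in range(0,max_select_item_each_row):
--                 item_weight = weigth_idx + 1
--                 item_value = operate_max_sum_matrix[i][weigth_idx]
--                 if bag_weigth >= item_weight:
--                     dp[bag_weigth] = max(dp[bag_weigth], dp[bag_weigth - item_weight] + item_value)
--
--     return dp[k]
-- ===== SOURCE B (Python) =====
-- def MaxSumOfRemovedKConnerItemsFromMatrixRow(matrix, k):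
--     if len(matrix) == 0 or len(matrix[0]) == 0:
--         return 0
--     M = min(len(matrix[0]), k)
--     gains = []
--     for v in matrix:
--         f = [0] * (M + 1)
--         if v:
--             pre = [0]
--             for x in v:
--                 pre.append(pre[-1] + x)
--             suf = [0]
--             for x in reversed(v):
--                 suf.append(suf[-1] + x)
--             for m in range(1, M + 1):
--                 f[m] = max(pre[i] + suf[m - i] for i in range(m + 1))
--         gains.append(f)
--     memo = {}
--
--     def solve(i):
--         if i < 0:
--             return [0] * (k + 1)
--         if i not in memo:
--             prev = solve(i - 1)
--             f = gains[i]
--             cur = prev[:]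
--             for m in range(1, M + 1):
--                 fm = f[m]
--                 cur[m:] = [max(c, p + fm) for c, p in zip(cur[m:], prev)]
--             memo[i] = cur
--         return memo[i]
--
--     return solve(len(matrix) - 1)[k]
-- ===== Notes on version B (the rewrite author's own statement) =====
-- stated objective: alternative
-- what changed: B computes each row's gain for removing m corner items directly as the maximum over splits prefix[i]+suffix[m-i] from two cumulative-sum arrays (instead of A's total-minus-minimum-sliding-window rescan per removal count), and combines rows by top-down memoized recursion solve(i) from the last row, each level deriving a fresh budget table from the previous level's by ascending zip passes (instead of A's bottom-up in-place knapsack array with descending bag order).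
import Mathlib
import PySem

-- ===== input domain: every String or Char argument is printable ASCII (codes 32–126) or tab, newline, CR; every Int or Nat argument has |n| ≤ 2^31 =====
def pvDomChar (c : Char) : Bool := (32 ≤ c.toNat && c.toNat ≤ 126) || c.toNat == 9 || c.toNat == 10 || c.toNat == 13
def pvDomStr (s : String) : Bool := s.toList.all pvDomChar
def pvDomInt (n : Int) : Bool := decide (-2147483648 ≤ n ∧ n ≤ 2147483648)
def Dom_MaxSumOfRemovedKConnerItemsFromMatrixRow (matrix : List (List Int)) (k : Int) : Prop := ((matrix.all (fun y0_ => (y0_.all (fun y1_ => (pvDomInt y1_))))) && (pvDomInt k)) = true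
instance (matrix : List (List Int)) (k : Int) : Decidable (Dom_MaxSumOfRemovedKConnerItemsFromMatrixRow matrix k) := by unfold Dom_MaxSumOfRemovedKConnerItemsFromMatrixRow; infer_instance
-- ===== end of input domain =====

-- B replaces A's complement view (row gain = total minus the minimum fixed-width window,
-- found by a sliding rescan per removal count) by the direct corner view (max over splits
-- prefix[i] + suffix[m-i] from two cumulative-sum arrays), and A's bottom-up in-place
-- knapsack array by top-down memoized recursion over rows (objective: alternative).
-- Equivalence is proved on Pre_ (A raises elsewhere).


-- ===== PORT A =====
-- helper of A; v[i] and v[i - ws] are in range on every input Pre_ admits, so pyGet? …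
-- is written as pyGetD … 0 (exact there)
def pvMaxSelStep (v : List Int) (ws : Int) (st : Int × Int × Int × Int) (i : Int) : Int × Int × Int × Int :=
  let x := PySem.List.pyGetD v i 0
  let sumAll := st.1 + x
  let winSum := st.2.1 + x
  let cur := st.2.2.1 + 1
  let minWin := st.2.2.2
  if cur = ws then (sumAll, winSum, cur, winSum)
  else if ws < cur then
    let winSum2 := winSum - PySem.List.pyGetD v (i - ws) 0
    (sumAll, winSum2, cur, if winSum2 < minWin then winSum2 else minWin)
  else (sumAll, winSum, cur, minWin)

def MaxSelectedKCornerItemItemFromArray (v : List Int) (remove_item : Int) : Int :=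
  let ws : Int := (v.length : Int) - remove_item
  let st := (PySem.List.pyRange 0 (v.length : Int) 1).foldl (pvMaxSelStep v ws) (0, 0, 0, 0)
  st.1 - st.2.2.2

def MaxSumOfRemovedKConnerItemsFromMatrixRow (matrix : List (List Int)) (k : Int) : Int :=
  let rows : Int := (matrix.length : Int)
  if rows = 0 then 0
  else
    let columns : Int := ((matrix.headD []).length : Int)
    if columns = 0 then 0
    else
      -- where k > rows * columns the Python raises; Pre_ excludes those inputs
      let M : Int := min columns k
      let omsm : List (List Int) :=
        (PySem.List.pyRange 0 rows 1).map (fun i =>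
          (PySem.List.pyRange 0 M 1).map (fun j =>
            MaxSelectedKCornerItemItemFromArray (PySem.List.pyGetD matrix i []) (j + 1)))
      let dp0 : List Int := List.replicate (k + 1).toNat 0
      let dp := (PySem.List.pyRange 0 (omsm.length : Int) 1).foldl (fun dp i =>
        (PySem.List.pyRange 0 k 1).foldl (fun dp r =>
          let bag := k - r
          (PySem.List.pyRange 0 M 1).foldl (fun dp wIdx =>
            let item_weight := wIdx + 1
            let item_value := PySem.List.pyGetD (PySem.List.pyGetD omsm i []) wIdx 0
            if item_weight ≤ bag then
              PySem.List.pySetD dp bag (max (PySem.List.pyGetD dp bag 0)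
                (PySem.List.pyGetD dp (bag - item_weight) 0 + item_value))
            else dp) dp) dp) dp0
      PySem.List.pyGetD dp k 0

-- ===== PORT B =====
-- running cumulative-sum list: for x in v: pre.append(pre[-1] + x)
def pvPrefixFrom (acc : Int) : List Int → List Int
  | [] => []
  | x :: xs => (acc + x) :: pvPrefixFrom (acc + x) xs

-- B's gains row: f[0] = 0 and, for 1 ≤ m ≤ M, f[m] = max over splits i of
-- (sum of first i items) + (sum of last m−i items); all zeros for an empty row
def pvRowGainsB (v : List Int) (M : Int) : List Int :=
  if v = [] then List.replicate (M + 1).toNat 0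
  else
    let pre : List Int := 0 :: pvPrefixFrom 0 v
    let suf : List Int := 0 :: pvPrefixFrom 0 v.reverse
    0 :: (PySem.List.pyRange 1 (M + 1) 1).map (fun m =>
      (PySem.List.max? ((PySem.List.pyRange 0 (m + 1) 1).map (fun i =>
        PySem.List.pyGetD pre i 0 + PySem.List.pyGetD suf (m - i) 0)) (fun x => x)).getD 0)

-- one level of B's solve: cur = prev[:], then for each weight m an ascending pass
-- cur[m:] = [max(c, p + f[m]) for c, p in zip(cur[m:], prev)]; m is positive on every
-- pyRange element, so the slice from m is cur.drop m.toNat (exact there)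
def pvSolveStep (M : Int) (f prev : List Int) : List Int :=
  (PySem.List.pyRange 1 (M + 1) 1).foldl (fun cur m =>
    let fm := PySem.List.pyGetD f m 0
    cur.take m.toNat ++ List.zipWith (fun c p => max c (p + fm)) (cur.drop m.toNat) prev) prev

-- B's solve(i): recursion on the row index from the last row downwards, ported as
-- structural recursion over the reversed gains list (the memo table only caches values)
def pvSolveB (kI M : Int) : List (List Int) → List Int
  | [] => List.replicate (kI + 1).toNat 0
  | f :: rest => pvSolveStep M f (pvSolveB kI M rest)

def MaxSumOfRemovedKConnerItemsFromMatrixRow_alt (matrix : List (List Int)) (k : Int) : Int :=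
  if (matrix.length : Int) = 0 then 0
  else if ((matrix.headD []).length : Int) = 0 then 0
  else
    let M : Int := min ((matrix.headD []).length : Int) k
    let gains : List (List Int) := matrix.map (fun v => pvRowGainsB v M)
    PySem.List.pyGetD (pvSolveB k M gains.reverse) k 0

-- ===== PRECONDITION & SPEC =====
-- Pre_ admits exactly the inputs on which the Python A returns: it excludes k < 0 and
-- k > rows*columns and ragged inputs with a nonempty row shorter than min(columns, k)
-- (on all of these A raises: IndexError, the explicit Exception, or IndexError in the
-- sliding window); nothing on which A returns a value is excluded.
def Pre_MaxSumOfRemovedKConnerItemsFromMatrixRow (matrix : List (List Int)) (k : Int) : Prop :=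
  matrix = [] ∨ matrix.headD [] = [] ∨
    (0 ≤ k ∧ k ≤ (matrix.length : Int) * ((matrix.headD []).length : Int) ∧
      ∀ v ∈ matrix, v = [] ∨ min ((matrix.headD []).length : Int) k ≤ (v.length : Int))
instance (matrix : List (List Int)) (k : Int) : Decidable (Pre_MaxSumOfRemovedKConnerItemsFromMatrixRow matrix k) := by unfold Pre_MaxSumOfRemovedKConnerItemsFromMatrixRow; infer_instance

def pvWitness_MaxSumOfRemovedKConnerItemsFromMatrixRow : List (List Int) × Int := ([[1, 2, 3], [4, 5, 6]], 3)

def Spec_MaxSumOfRemovedKConnerItemsFromMatrixRow (matrix : List (List Int)) (k : Int) (out : Int) : Prop := out = MaxSumOfRemovedKConnerItemsFromMatrixRow_alt matrix k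
instance (matrix : List (List Int)) (k : Int) (out : Int) : Decidable (Spec_MaxSumOfRemovedKConnerItemsFromMatrixRow matrix k out) := by unfold Spec_MaxSumOfRemovedKConnerItemsFromMatrixRow; infer_instance

-- ===== CLAIM (what is proved, stated in full; the proofs are below) =====
def Claim_equal_MaxSumOfRemovedKConnerItemsFromMatrixRow : Prop := ∀ (matrix : List (List Int)) (k : Int), Dom_MaxSumOfRemovedKConnerItemsFromMatrixRow matrix k → Pre_MaxSumOfRemovedKConnerItemsFromMatrixRow matrix k → Spec_MaxSumOfRemovedKConnerItemsFromMatrixRow matrix k (MaxSumOfRemovedKConnerItemsFromMatrixRow matrix k)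

-- ===== LEMMAS AND PROOFS =====

-- proof-only helpers and lemmas

def pvP (v : List Int) (j : Nat) : Int := ((v.take j).sum)

theorem pvP_succ (v : List Int) (j : Nat) (h : j < v.length) :
    pvP v (j + 1) = pvP v j + v.getD j 0 := by
  unfold pvP
  rw [List.take_add_one, List.sum_append]
  simp [List.getD, List.getElem?_eq_getElem h]

theorem pvP_length (v : List Int) : pvP v v.length = v.sum := by
  simp [pvP]

theorem pvPrefixFrom_cons (a x : Int) (xs : List Int) :
    pvPrefixFrom a (x :: xs) = (a + x) :: pvPrefixFrom (a + x) xs := rfl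

theorem pvPrefixFrom_getD (v : List Int) : ∀ (a : Int) (j : Nat), j < v.length →
    (pvPrefixFrom a v).getD j 0 = a + pvP v (j + 1) := by
  induction v with
  | nil => intro a j h; simp at h
  | cons x xs ih =>
    intro a j h
    rw [pvPrefixFrom_cons]
    cases j with
    | zero => show a + x = a + pvP (x :: xs) 1; simp [pvP]
    | succ j =>
      rw [List.getD_cons_succ, ih (a + x) j (by simpa using h)]
      unfold pvP
      rw [List.take_succ_cons, List.sum_cons]
      ring

theorem pref_getD (v : List Int) (j : Nat) (h : j ≤ v.length) :
    PySem.List.pyGetD (0 :: pvPrefixFrom 0 v) (j : Int) 0 = pvP v j := by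
  rw [PySem.List.pyGetD_natCast]
  cases j with
  | zero => simp [pvP]
  | succ j =>
    rw [List.getD_cons_succ, pvPrefixFrom_getD v 0 j (by omega)]
    ring

-- the old per-row complement form (A's view), used as the meeting point of the proofs
def pvRowGains (v : List Int) (M : Int) : List Int :=
  let n : Int := (v.length : Int)
  let pref : List Int := 0 :: pvPrefixFrom 0 v
  let total : Int := PySem.List.pyGetD pref n 0
  0 :: (PySem.List.pyRange 1 (M + 1) 1).map (fun m =>
    let w := n - m
    if w ≤ 0 then total
    else total - ((PySem.List.min? ((PySem.List.pyRange 0 (n - w + 1) 1).map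
        (fun t => PySem.List.pyGetD pref (t + w) 0 - PySem.List.pyGetD pref t 0))
        (fun x => x)).getD 0))

def pvG (v : List Int) (ws t : Nat) : Int := pvP v (t + ws) - pvP v t

def pvMinTo (v : List Int) (ws j : Nat) : Int :=
  ((List.range (j - ws)).map (fun t => pvG v ws (t + 1))).foldl min (pvG v ws 0)

theorem A_loop (v : List Int) (ws : Nat) (h1 : 1 ≤ ws) (j : Nat) (hj : j ≤ v.length) :
    (PySem.List.pyRange 0 (j : Int) 1).foldl (pvMaxSelStep v (ws : Int)) (0, 0, 0, 0)
      = (pvP v j, pvP v j - pvP v (j - ws), (j : Int),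
         if j < ws then 0 else pvMinTo v ws j) := by
  induction j with
  | zero =>
    rw [PySem.List.pyRange_one_eq_nil (by norm_num)]
    simp [pvP]
    intro h; omega
  | succ j ih =>
    have hj' : j ≤ v.length := by omega
    have hjl : j < v.length := by omega
    rw [show ((j + 1 : Nat) : Int) = (j : Int) + 1 by push_cast; ring,
        PySem.List.pyRange_one_succ_right (by positivity),
        List.foldl_append, ih hj']
    simp only [List.foldl]
    unfold pvMaxSelStep
    simp only [PySem.List.pyGetD_natCast]
    by_cases hcur : (j : Int) + 1 = (ws : Int)
    · -- first full window
      have hws : ws = j + 1 := by omega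
      rw [if_pos hcur]
      have hnot : ¬ j + 1 < ws := by omega
      have hlt : j < ws := by omega
      simp only [Prod.mk.injEq]
      and_intros
      · exact (pvP_succ v j hjl).symm
      · rw [Nat.sub_eq_zero_of_le (by omega), Nat.sub_eq_zero_of_le (by omega),
            pvP_succ v j hjl]
        simp [pvP]
      · trivial
      · rw [if_neg hnot, pvMinTo, Nat.sub_eq_zero_of_le (by omega)]
        simp only [pvG, Nat.zero_add]
        rw [Nat.sub_eq_zero_of_le (by omega), hws, pvP_succ v j hjl]
        simp [pvP]
  -- remaining branches
    · by_cases hgt : (ws : Int) < (j : Int) + 1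
      · have hwsj : ws ≤ j := by omega
        rw [if_neg hcur, if_pos hgt]
        have hc1 : (j : Int) - (ws : Int) = ((j - ws : Nat) : Int) := by
          push_cast [hwsj]; ring
        rw [hc1, PySem.List.pyGetD_natCast]
        have hnj : ¬ j < ws := by omega
        have hnj1 : ¬ j + 1 < ws := by omega
        have hsub : j + 1 - ws = (j - ws) + 1 := by omega
        have hjws : j - ws < v.length := by omega
        have hwin2 : pvP v j - pvP v (j - ws) + v.getD j 0 - v.getD (j - ws) 0
            = pvP v (j + 1) - pvP v (j + 1 - ws) := by
          rw [pvP_succ v j hjl, hsub, pvP_succ v (j - ws) hjws]; ring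
        simp only [Prod.mk.injEq]
        and_intros
        · exact (pvP_succ v j hjl).symm
        · exact hwin2
        · trivial
        · rw [if_neg hnj, if_neg hnj1, pvMinTo, pvMinTo, hsub, List.range_succ,
              List.map_append, List.foldl_append]
          simp only [List.map_cons, List.map_nil, List.foldl_cons, List.foldl_nil]
          have hG : pvG v ws (j - ws + 1) = pvP v (j + 1) - pvP v (j + 1 - ws) := by
            rw [pvG, show j - ws + 1 + ws = j + 1 by omega, hsub]
          rw [hG, hwin2]
          rcases lt_or_ge (pvP v (j + 1) - pvP v (j + 1 - ws))
              (((List.range (j - ws)).map (fun t => pvG v ws (t + 1))).foldl min (pvG v ws 0)) with h | h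
          · rw [if_pos h, min_eq_right (le_of_lt h)]
          · rw [if_neg (by omega), min_eq_left h]
      · -- window not yet full
        have hlt1 : j + 1 < ws := by omega
        rw [if_neg hcur, if_neg hgt]
        simp only [Prod.mk.injEq]
        and_intros
        · exact (pvP_succ v j hjl).symm
        · rw [Nat.sub_eq_zero_of_le (by omega), Nat.sub_eq_zero_of_le (by omega),
              pvP_succ v j hjl]
          simp [pvP]
        · trivial
        · rw [if_pos (by omega : j < ws), if_pos hlt1]

theorem A_loop_zero (v : List Int) (j : Nat) (hj : j ≤ v.length) :
    (PySem.List.pyRange 0 (j : Int) 1).foldl (pvMaxSelStep v 0) (0, 0, 0, 0)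
      = (pvP v j, 0, (j : Int), 0) := by
  induction j with
  | zero =>
    rw [PySem.List.pyRange_one_eq_nil (by norm_num)]
    simp [pvP]
  | succ j ih =>
    have hjl : j < v.length := by omega
    rw [show ((j + 1 : Nat) : Int) = (j : Int) + 1 by push_cast; ring,
        PySem.List.pyRange_one_succ_right (by positivity),
        List.foldl_append, ih (by omega)]
    simp only [List.foldl]
    unfold pvMaxSelStep
    simp only [PySem.List.pyGetD_natCast]
    rw [if_neg (by omega), if_pos (by omega)]
    simp only [Prod.mk.injEq, sub_zero]
    and_intros
    · exact (pvP_succ v j hjl).symm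
    · simp
    · trivial
    · simp

def pvGainVal (v : List Int) (m : Nat) : Int :=
  if v.length ≤ m then v.sum else v.sum - pvMinTo v (v.length - m) v.length

theorem MaxSel_eq (v : List Int) (m : Nat) (hm : 1 ≤ m) (h : v = [] ∨ m ≤ v.length) :
    MaxSelectedKCornerItemItemFromArray v (m : Int) = pvGainVal v m := by
  rcases h with h | h
  · subst h
    rw [MaxSelectedKCornerItemItemFromArray, PySem.List.pyRange_one_eq_nil (by simp)]
    simp [pvGainVal]
  · rcases eq_or_lt_of_le h with he | hlt
    · -- m = v.length : window size 0
      rw [MaxSelectedKCornerItemItemFromArray]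
      have : (v.length : Int) - (m : Int) = 0 := by omega
      rw [this, A_loop_zero v v.length le_rfl]
      rw [pvGainVal, if_pos (by omega)]
      simp [pvP_length]
    · -- m < v.length : window size ws ≥ 1
      have hws1 : 1 ≤ v.length - m := by omega
      rw [MaxSelectedKCornerItemItemFromArray]
      have hc : (v.length : Int) - (m : Int) = ((v.length - m : Nat) : Int) := by omega
      rw [hc, A_loop v (v.length - m) hws1 v.length le_rfl]
      rw [pvGainVal, if_neg (by omega)]
      simp only []
      rw [if_neg (by omega), pvP_length]

theorem pvRowGains_getD_zero (v : List Int) (M : Int) :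
    PySem.List.pyGetD (pvRowGains v M) 0 0 = 0 := by
  rw [pvRowGains]
  exact PySem.List.pyGetD_zero_cons _ _ _

theorem pvRowGains_getD (v : List Int) (M : Int) (m : Nat) (hm : 1 ≤ m)
    (hM : (m : Int) ≤ M) (h : v = [] ∨ M ≤ (v.length : Int)) :
    PySem.List.pyGetD (pvRowGains v M) (m : Int) 0 = pvGainVal v m := by
  rw [pvRowGains]
  simp only []
  obtain ⟨m', rfl⟩ : ∃ m', m = m' + 1 := ⟨m - 1, by omega⟩
  rw [PySem.List.pyGetD_natCast, List.getD_cons_succ,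
      ← PySem.List.pyGetD_natCast _ m' (0 : Int),
      PySem.List.pyGetD_map_pyRange_one _ 1 (M + 1) m' 0 (by omega)]
  have hcast : (1 : Int) + (m' : Int) = ((m' + 1 : Nat) : Int) := by push_cast; ring
  set m := m' + 1 with hmdef
  have htot : PySem.List.pyGetD ((0 : Int) :: pvPrefixFrom 0 v) (v.length : Int) 0 = v.sum := by
    rw [pref_getD v v.length le_rfl, pvP_length]
  by_cases hnm : v.length ≤ m
  · -- width ≤ 0 : value is the whole sum
    rw [if_pos (by rw [hcast]; omega)]
    rw [htot, pvGainVal, if_pos hnm]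
  · -- positive width
    have hn : m < v.length := by omega
    have hMn : M ≤ (v.length : Int) := by
      rcases h with h | h
      · subst h; simp at hn
      · exact h
    rw [if_neg (by rw [hcast]; omega)]
    rw [htot]
    set ws : Nat := v.length - m with hws
    have h1 : (v.length : Int) - ((1 : Int) + (m' : Int)) = (ws : Int) := by
      rw [hcast]; omega
    have h2 : (v.length : Int) - ((v.length : Int) - ((1 : Int) + (m' : Int))) + 1
        = ((m + 1 : Nat) : Int) := by rw [hcast]; push_cast; omega
    rw [pvGainVal, if_neg (by omega)]
    congr 1
    rw [h2, PySem.List.pyRange_zero_natCast]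
    rw [List.map_map]
    have hmap : ∀ t ∈ List.range (m + 1),
        ((fun t : Int => PySem.List.pyGetD ((0:Int) :: pvPrefixFrom 0 v) (t + ((v.length : Int) - ((1:Int) + (m' : Int)))) 0
            - PySem.List.pyGetD ((0:Int) :: pvPrefixFrom 0 v) t 0) ∘ (fun k : Nat => (k : Int))) t
          = pvG v ws t := by
      intro t ht
      have htm : t ≤ m := by simpa [List.mem_range] using Nat.lt_succ_iff.mp (by simpa using ht)
      simp only [Function.comp]
      rw [h1, show ((t : Int) + (ws : Int)) = ((t + ws : Nat) : Int) by push_cast; ring]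
      rw [pref_getD v (t + ws) (by omega), pref_getD v t (by omega), pvG]
    rw [List.map_congr_left hmap]
    rw [show List.range (m + 1) = 0 :: (List.range m).map Nat.succ from List.range_succ_eq_map]
    simp only [List.map_cons, List.map_map]
    rw [PySem.List.min?_id_cons]
    simp only [Option.getD_some]
    rw [pvMinTo, show v.length - ws = m by omega]
    congr 1

-- ===== the B-side row lemma: corner-split maxima equal the complement form =====

theorem pvP_reverse (v : List Int) (j : Nat) (_hj : j ≤ v.length) :
    pvP v.reverse j = v.sum - pvP v (v.length - j) := by
  have h1 : pvP v (v.length - j) + (v.drop (v.length - j)).sum = v.sum := by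
    rw [pvP, List.sum_take_add_sum_drop]
  have h2 : v.reverse.take j = (v.drop (v.length - j)).reverse := by
    rw [List.take_reverse]
  rw [pvP, h2, List.sum_reverse]
  omega

theorem pv_foldl_max_sub (c : Int) (f : Nat → Int) :
    ∀ (l : List Nat) (a : Int),
      l.foldl (fun acc t => max acc (c - f t)) (c - a)
        = c - l.foldl (fun acc t => min acc (f t)) a := by
  intro l
  induction l with
  | nil => intro a; simp
  | cons x xs ih =>
    intro a
    rw [List.foldl_cons, List.foldl_cons,
        show max (c - a) (c - f x) = c - min a (f x) by omega]
    exact ih (min a (f x))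

theorem pv_foldl_min_zero (l : List Nat) (f : Nat → Int) (h : ∀ t ∈ l, f t = 0) :
    l.foldl (fun acc t => min acc (f t)) 0 = 0 := by
  induction l with
  | nil => rfl
  | cons x xs ih =>
    rw [List.foldl_cons, h x (by simp), min_self]
    exact ih (fun t ht => h t (by simp [ht]))

theorem pvMinTo_zero (v : List Int) (j : Nat) : pvMinTo v 0 j = 0 := by
  rw [pvMinTo, List.foldl_map]
  have hg : ∀ t, pvG v 0 t = 0 := by intro t; simp [pvG]
  rw [hg 0]
  exact pv_foldl_min_zero _ _ (fun t _ => hg (t + 1))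

theorem pvRowGainsB_getD (v : List Int) (M : Int) (m : Nat) (hm : 1 ≤ m)
    (hM : (m : Int) ≤ M) (h : v = [] ∨ M ≤ (v.length : Int)) :
    PySem.List.pyGetD (pvRowGainsB v M) (m : Int) 0 = pvGainVal v m := by
  rw [pvRowGainsB]
  by_cases hv : v = []
  · -- empty row: every entry is 0 and pvGainVal is the empty sum
    rw [if_pos hv, PySem.List.pyGetD_natCast]
    have hlen : m < (M + 1).toNat := by omega
    rw [List.getD_eq_getElem _ _ (by simpa using hlen), List.getElem_replicate]
    subst hv
    simp [pvGainVal]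
  · rw [if_neg hv]
    have hMn : M ≤ (v.length : Int) := by
      rcases h with h | h
      · exact absurd h hv
      · exact h
    have hmn : m ≤ v.length := by omega
    simp only []
    obtain ⟨m', rfl⟩ : ∃ m', m = m' + 1 := ⟨m - 1, by omega⟩
    rw [PySem.List.pyGetD_natCast, List.getD_cons_succ,
        ← PySem.List.pyGetD_natCast _ m' (0 : Int),
        PySem.List.pyGetD_map_pyRange_one _ 1 (M + 1) m' 0 (by omega)]
    have hcast : (1 : Int) + (m' : Int) = ((m' + 1 : Nat) : Int) := by push_cast; ring
    set m := m' + 1 with hmdef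
    set ws : Nat := v.length - m with hws
    -- each split term is total − (window of width n−m starting at i)
    rw [show (1 : Int) + (m' : Int) + 1 = ((m + 1 : Nat) : Int) by omega,
        PySem.List.pyRange_zero_natCast, List.map_map]
    have hmap : ∀ i ∈ List.range (m + 1),
        ((fun i : Int => PySem.List.pyGetD ((0:Int) :: pvPrefixFrom 0 v) i 0
            + PySem.List.pyGetD ((0:Int) :: pvPrefixFrom 0 v.reverse) ((1:Int) + (m' : Int) - i) 0)
          ∘ (fun k : Nat => (k : Int))) i
          = v.sum - pvG v ws i := by
      intro i hi
      have him : i ≤ m := Nat.lt_succ_iff.mp (by simpa using hi)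
      simp only [Function.comp]
      rw [pref_getD v i (by omega),
          show (1:Int) + (m' : Int) - (i : Int) = ((m - i : Nat) : Int) by rw [hcast]; omega,
          pref_getD v.reverse (m - i) (by simpa using by omega : m - i ≤ v.reverse.length),
          pvP_reverse v (m - i) (by omega), pvG,
          show v.length - (m - i) = i + ws by omega]
      ring
    rw [List.map_congr_left hmap,
        show List.range (m + 1) = 0 :: (List.range m).map Nat.succ from List.range_succ_eq_map]
    simp only [List.map_cons, List.map_map]
    rw [PySem.List.max?_id_cons]
    simp only [Option.getD_some]
    rw [List.foldl_map]
    simp only [Function.comp, Nat.succ_eq_add_one]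
    rw [pv_foldl_max_sub v.sum (fun t => pvG v ws (t + 1)) (List.range m) (pvG v ws 0)]
    have hminto : (List.range m).foldl (fun acc t => min acc (pvG v ws (t + 1))) (pvG v ws 0)
        = pvMinTo v ws v.length := by
      rw [pvMinTo, show v.length - ws = m by omega, List.foldl_map]
    rw [hminto, pvGainVal]
    by_cases hnm : v.length ≤ m
    · rw [if_pos hnm, show ws = 0 by omega, pvMinTo_zero]
      ring
    · rw [if_neg hnm, hws]

-- ===== A's in-place knapsack characterised as a per-bag functional rebuild =====

def pvBest (dp : List Int) (F : Nat → Int) (Mt b : Nat) : Int :=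
  (List.range (min Mt b)).foldl (fun acc t => max acc (dp.getD (b - (t + 1)) 0 + F (t + 1)))
    (dp.getD b 0)

theorem pv_getD_set_self (l : List Int) (i : Nat) (h : i < l.length) (x : Int) :
    (l.set i x).getD i 0 = x := by
  simp [List.getD, h]

theorem pv_getD_set_ne (l : List Int) (i j : Nat) (h : i ≠ j) (x : Int) :
    (l.set i x).getD j 0 = l.getD j 0 := by
  simp [List.getD, List.getElem?_set_ne h]

theorem pv_set_getD_self (l : List Int) (i : Nat) (h : i < l.length) :
    l.set i (l.getD i 0) = l := by
  apply List.ext_getElem (by simp)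
  intro n h1 h2
  by_cases hn : n = i
  · subst hn; simp [List.getD, List.getElem?_eq_getElem h]
  · rw [List.getElem_set_ne (show i ≠ n from fun hc => hn hc.symm)]

theorem pvBest_congr (dp1 dp2 : List Int) (F : Nat → Int) (Mt b : Nat)
    (h : ∀ i, i ≤ b → dp1.getD i 0 = dp2.getD i 0) :
    pvBest dp1 F Mt b = pvBest dp2 F Mt b := by
  unfold pvBest
  rw [h b le_rfl]
  apply PySem.List.foldl_congr_mem
  intro acc t ht
  rw [h (b - (t + 1)) (by omega)]

theorem knap_inner (gl : List Int) (F : Nat → Int) (Mt : Nat)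
    (hF : ∀ t, t < Mt → gl.getD t 0 = F (t + 1))
    (dp : List Int) (k b : Nat) (hlen : dp.length = k + 1) (hb1 : 1 ≤ b) (hbk : b ≤ k) :
    (PySem.List.pyRange 0 (Mt : Int) 1).foldl (fun dp wIdx =>
        if wIdx + 1 ≤ (b : Int) then
          PySem.List.pySetD dp (b : Int) (max (PySem.List.pyGetD dp (b : Int) 0)
            (PySem.List.pyGetD dp ((b : Int) - (wIdx + 1)) 0 + PySem.List.pyGetD gl wIdx 0))
        else dp) dp
      = dp.set b (pvBest dp F Mt b) := by
  induction Mt with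
  | zero =>
    rw [PySem.List.pyRange_one_eq_nil (by norm_num), List.foldl_nil, pvBest]
    rw [show min 0 b = 0 from by omega]
    simp only [List.range_zero, List.foldl_nil]
    exact (pv_set_getD_self dp b (by omega)).symm
  | succ Mt ih =>
    have ih' := ih (fun t ht => hF t (by omega))
    rw [show ((Mt + 1 : Nat) : Int) = (Mt : Int) + 1 by push_cast; ring,
        PySem.List.pyRange_one_succ_right (by positivity), List.foldl_append, ih']
    simp only [List.foldl]
    by_cases hMb : Mt + 1 ≤ b
    · rw [if_pos (by omega)]
      have hblen : b < dp.length := by omega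
      have hge1 : PySem.List.pyGetD (dp.set b (pvBest dp F Mt b)) (b : Int) 0
          = pvBest dp F Mt b := by
        rw [PySem.List.pyGetD_natCast, pv_getD_set_self dp b hblen]
      have hcast : (b : Int) - ((Mt : Int) + 1) = ((b - (Mt + 1) : Nat) : Int) := by
        omega
      have hge2 : PySem.List.pyGetD (dp.set b (pvBest dp F Mt b)) ((b : Int) - ((Mt : Int) + 1)) 0
          = dp.getD (b - (Mt + 1)) 0 := by
        rw [hcast, PySem.List.pyGetD_natCast, pv_getD_set_ne dp b (b - (Mt + 1)) (by omega)]
      rw [hge1, hge2, PySem.List.pyGetD_natCast, hF Mt (by omega),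
          PySem.List.pySetD_natCast, List.set_set]
      congr 1
      rw [pvBest, pvBest, show min (Mt + 1) b = (min Mt b) + 1 from by omega,
          List.range_succ, List.foldl_append, List.foldl_cons, List.foldl_nil,
          show min Mt b = Mt from by omega]
    · rw [if_neg (by omega)]
      congr 1
      rw [pvBest, pvBest, show min (Mt + 1) b = min Mt b from by omega]

theorem pv_map_getD_range (l : List Int) (k : Nat) (h : l.length = k + 1) :
    (List.range (k + 1)).map (fun i => l.getD i 0) = l := by
  apply List.ext_getElem (by simp [h])
  intro n h1 h2
  simp only [List.getElem_map, List.getElem_range]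
  simp [List.getD, List.getElem?_eq_getElem h2]

theorem knap_outer (gl : List Int) (F : Nat → Int) (Mt : Nat)
    (hF : ∀ t, t < Mt → gl.getD t 0 = F (t + 1))
    (k : Nat) (dp : List Int) (hlen : dp.length = k + 1) :
    ∀ j, j ≤ k →
    (PySem.List.pyRange 0 (j : Int) 1).foldl (fun dp r =>
      (PySem.List.pyRange 0 (Mt : Int) 1).foldl (fun dp wIdx =>
        if wIdx + 1 ≤ (k : Int) - r then
          PySem.List.pySetD dp ((k : Int) - r) (max (PySem.List.pyGetD dp ((k : Int) - r) 0)
            (PySem.List.pyGetD dp ((k : Int) - r - (wIdx + 1)) 0 + PySem.List.pyGetD gl wIdx 0))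
        else dp) dp) dp
      = (List.range (k + 1)).map (fun i => if k - j < i then pvBest dp F Mt i else dp.getD i 0) := by
  intro j hj
  induction j with
  | zero =>
    rw [show PySem.List.pyRange 0 ((0 : Nat) : Int) 1 = [] from
          PySem.List.pyRange_one_eq_nil (by norm_num), List.foldl_nil]
    rw [List.map_congr_left (fun i hi => by
      rw [if_neg (by simp only [List.mem_range] at hi; omega)])]
    exact (pv_map_getD_range dp k hlen).symm
  | succ j ih =>
    have hjk : j ≤ k := by omega
    rw [show ((j + 1 : Nat) : Int) = (j : Int) + 1 by push_cast; ring,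
        PySem.List.pyRange_one_succ_right (by positivity), List.foldl_append, ih hjk]
    simp only [List.foldl]
    set Lj := (List.range (k + 1)).map
      (fun i => if k - j < i then pvBest dp F Mt i else dp.getD i 0) with hLj
    have hLjlen : Lj.length = k + 1 := by simp [hLj]
    have hcast : (k : Int) - (j : Int) = ((k - j : Nat) : Int) := by omega
    rw [hcast, knap_inner gl F Mt hF Lj k (k - j) hLjlen (by omega) (by omega)]
    have hagree : ∀ i, i ≤ k - j → Lj.getD i 0 = dp.getD i 0 := by
      intro i hi
      rw [hLj]
      have hik : i < k + 1 := by omega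
      have : ((List.range (k+1)).map (fun i => if k - j < i then pvBest dp F Mt i else dp.getD i 0)).getD i 0
          = if k - j < i then pvBest dp F Mt i else dp.getD i 0 := by
        rw [List.getD, List.getElem?_map, List.getElem?_range hik]
        rfl
      rw [this, if_neg (by omega)]
    rw [pvBest_congr Lj dp F Mt (k - j) hagree]
    apply List.ext_getElem (by simp [hLj])
    intro n h1 h2
    simp only [List.length_map, List.length_range] at h2
    by_cases hn : n = k - j
    · subst hn
      rw [List.getElem_set_self (by omega)]
      simp only [List.getElem_map, List.getElem_range]
      rw [if_pos (by omega)]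
    · rw [List.getElem_set_ne (fun hc => hn hc.symm)]
      simp only [hLj, List.getElem_map, List.getElem_range]
      by_cases hlt : k - j < n
      · rw [if_pos hlt, if_pos (by omega)]
      · rw [if_neg hlt, if_neg (by omega)]

-- the rebuilt-row form (meeting point between A's knapsack and B's recursion)
def pvBStep (kN Mt : Nat) (v : List Int) (dp : List Int) : List Int :=
  (PySem.List.pyRange 0 ((kN : Int) + 1) 1).map (fun b =>
    (PySem.List.max? ((PySem.List.pyRange 0 (min (Mt : Int) b + 1) 1).map
      (fun m => PySem.List.pyGetD dp (b - m) 0 + PySem.List.pyGetD (pvRowGains v (Mt : Int)) m 0))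
      (fun x => x)).getD 0)

def pvAStep (kN Mt : Nat) (gl : List Int) (dp : List Int) : List Int :=
  (PySem.List.pyRange 0 (kN : Int) 1).foldl (fun dp r =>
    (PySem.List.pyRange 0 (Mt : Int) 1).foldl (fun dp wIdx =>
      if wIdx + 1 ≤ (kN : Int) - r then
        PySem.List.pySetD dp ((kN : Int) - r) (max (PySem.List.pyGetD dp ((kN : Int) - r) 0)
          (PySem.List.pyGetD dp ((kN : Int) - r - (wIdx + 1)) 0 + PySem.List.pyGetD gl wIdx 0))
      else dp) dp) dp

theorem B_row (f : List Int) (Mt k : Nat) (dp : List Int)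
    (hf0 : PySem.List.pyGetD f 0 0 = 0) :
    (PySem.List.pyRange 0 ((k : Int) + 1) 1).map (fun b =>
      (PySem.List.max? ((PySem.List.pyRange 0 (min (Mt : Int) b + 1) 1).map
        (fun m => PySem.List.pyGetD dp (b - m) 0 + PySem.List.pyGetD f m 0))
        (fun x => x)).getD 0)
    = (List.range (k + 1)).map
        (fun i => pvBest dp (fun m => PySem.List.pyGetD f (m : Int) 0) Mt i) := by
  rw [show ((k : Int) + 1) = ((k + 1 : Nat) : Int) by push_cast; ring,
      PySem.List.pyRange_zero_natCast, List.map_map]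
  apply List.map_congr_left
  intro i hi
  simp only [Function.comp]
  rw [show min (Mt : Int) (i : Int) + 1 = ((min Mt i + 1 : Nat) : Int) by push_cast; omega,
      PySem.List.pyRange_zero_natCast, List.map_map]
  rw [show List.range (min Mt i + 1) = 0 :: (List.range (min Mt i)).map Nat.succ from
        List.range_succ_eq_map]
  simp only [List.map_cons, List.map_map]
  rw [PySem.List.max?_id_cons]
  simp only [Option.getD_some, Function.comp]
  have h0 : PySem.List.pyGetD dp ((i : Int) - ((0 : Nat) : Int)) 0 + PySem.List.pyGetD f ((0 : Nat) : Int) 0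
      = dp.getD i 0 := by
    norm_num [hf0, PySem.List.pyGetD_natCast]
  rw [h0, pvBest, List.foldl_map]
  apply PySem.List.foldl_congr_mem
  intro acc t ht
  simp only [List.mem_range] at ht
  have hti : t + 1 ≤ i := by omega
  simp only [Function.comp, Nat.succ_eq_add_one]
  rw [show (i : Int) - ((t + 1 : Nat) : Int) = ((i - (t + 1) : Nat) : Int) by push_cast; omega]
  rw [PySem.List.pyGetD_natCast]

theorem pv_row_eq (kN Mt : Nat) (v : List Int) (hv : v = [] ∨ Mt ≤ v.length)
    (dp : List Int) (hlen : dp.length = kN + 1) :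
    pvAStep kN Mt ((PySem.List.pyRange 0 (Mt : Int) 1).map
        (fun j => MaxSelectedKCornerItemItemFromArray v (j + 1))) dp
      = pvBStep kN Mt v dp := by
  have hF : ∀ t, t < Mt →
      ((PySem.List.pyRange 0 (Mt : Int) 1).map
        (fun j => MaxSelectedKCornerItemItemFromArray v (j + 1))).getD t 0
      = (fun m : Nat => PySem.List.pyGetD (pvRowGains v (Mt : Int)) (m : Int) 0) (t + 1) := by
    intro t ht
    rw [← PySem.List.pyGetD_natCast _ t (0 : Int),
        PySem.List.pyGetD_map_pyRange_one _ 0 (Mt : Int) t 0 (by omega)]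
    simp only [zero_add]
    rw [show ((t : Int) + 1) = ((t + 1 : Nat) : Int) by push_cast; ring]
    rw [MaxSel_eq v (t + 1) (by omega) (Or.imp id (fun h => by omega) hv)]
    rw [pvRowGains_getD v (Mt : Int) (t + 1) (by omega) (by push_cast; omega)
        (Or.imp id (fun h => by exact_mod_cast h) hv)]
  rw [pvAStep, knap_outer _ (fun m : Nat => PySem.List.pyGetD (pvRowGains v (Mt : Int)) (m : Int) 0) Mt hF kN dp hlen kN le_rfl, pvBStep,
      B_row (pvRowGains v (Mt : Int)) Mt kN dp (pvRowGains_getD_zero v (Mt : Int))]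
  apply List.map_congr_left
  intro i hi
  by_cases h0 : i = 0
  · subst h0
    rw [if_neg (by omega), pvBest, show min Mt 0 = 0 from by omega]
    simp [List.range_zero]
  · rw [if_pos (by omega)]

theorem pv_foldl_eq {α β : Type} (l : List α) (f g : β → α → β) (P : β → Prop)
    (hfg : ∀ b a, a ∈ l → P b → f b a = g b a)
    (hg : ∀ b a, a ∈ l → P b → P (g b a)) :
    ∀ b, P b → l.foldl f b = l.foldl g b := by
  induction l with
  | nil => simp
  | cons x xs ih =>
    intro b hb
    rw [List.foldl_cons, List.foldl_cons, hfg b x (by simp) hb]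
    exact ih (fun b a ha hb => hfg b a (by simp [ha]) hb)
      (fun b a ha hb => hg b a (by simp [ha]) hb) _ (hg b x (by simp) hb)

theorem pvBStep_length (kN Mt : Nat) (v : List Int) (dp : List Int) :
    (pvBStep kN Mt v dp).length = kN + 1 := by
  rw [pvBStep]
  rw [List.length_map, PySem.List.length_pyRange_one]
  omega

theorem A_fold_convert (kN Mt : Nat) (omsm : List (List Int)) (dp0 : List Int) :
    (PySem.List.pyRange 0 (omsm.length : Int) 1).foldl (fun dp i =>
      (PySem.List.pyRange 0 (kN : Int) 1).foldl (fun dp r =>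
        (PySem.List.pyRange 0 (Mt : Int) 1).foldl (fun dp wIdx =>
          if wIdx + 1 ≤ (kN : Int) - r then
            PySem.List.pySetD dp ((kN : Int) - r) (max (PySem.List.pyGetD dp ((kN : Int) - r) 0)
              (PySem.List.pyGetD dp ((kN : Int) - r - (wIdx + 1)) 0 +
                PySem.List.pyGetD (PySem.List.pyGetD omsm i []) wIdx 0))
          else dp) dp) dp) dp0
    = omsm.foldl (fun dp row => pvAStep kN Mt row dp) dp0 :=
  PySem.List.foldl_pyRange_zero_pyGetD' omsm [] (fun dp row => pvAStep kN Mt row dp) dp0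

-- ===== bridging the foldl of rebuilt rows and B's top-down recursion =====

theorem pvBest_F_congr (dp : List Int) (F1 F2 : Nat → Int) (Mt b : Nat)
    (h : ∀ t, 1 ≤ t → t ≤ Mt → F1 t = F2 t) :
    pvBest dp F1 Mt b = pvBest dp F2 Mt b := by
  unfold pvBest
  apply PySem.List.foldl_congr_mem
  intro acc t ht
  simp only [List.mem_range] at ht
  rw [h (t + 1) (by omega) (by omega)]

theorem pvSolveStep_inv (f dp : List Int) (kN : Nat) (hlen : dp.length = kN + 1) :
    ∀ (m : Nat), m ≤ kN →
      (PySem.List.pyRange 1 ((m : Int) + 1) 1).foldl (fun cur mi =>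
          let fm := PySem.List.pyGetD f mi 0
          cur.take mi.toNat ++ List.zipWith (fun c p => max c (p + fm)) (cur.drop mi.toNat) dp) dp
        = (List.range (kN + 1)).map
            (fun b => pvBest dp (fun t => PySem.List.pyGetD f (t : Int) 0) m b) := by
  intro m
  induction m with
  | zero =>
    intro _
    rw [show ((0 : Nat) : Int) + 1 = 1 by norm_num, PySem.List.pyRange_one_eq_nil le_rfl,
        List.foldl_nil]
    conv_lhs => rw [← pv_map_getD_range dp kN hlen]
    apply List.map_congr_left
    intro b _
    rw [pvBest]
    simp
  | succ m ih =>
    intro hm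
    rw [show ((m + 1 : Nat) : Int) + 1 = ((m : Int) + 1) + 1 by push_cast; ring,
        PySem.List.pyRange_one_succ_right (by omega), List.foldl_append,
        ih (by omega), List.foldl_cons, List.foldl_nil]
    simp only []
    set F : Nat → Int := fun t => PySem.List.pyGetD f (t : Int) 0 with hF
    set L := (List.range (kN + 1)).map (fun b => pvBest dp F m b) with hL
    have hLlen : L.length = kN + 1 := by simp [hL]
    have htn : ((m : Int) + 1).toNat = m + 1 := by omega
    have hfm : PySem.List.pyGetD f ((m : Int) + 1) 0 = F (m + 1) := by
      have hc : (((m + 1 : Nat)) : Int) = (m : Int) + 1 := by push_cast; ring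
      show _ = PySem.List.pyGetD f (((m + 1 : Nat)) : Int) 0
      rw [hc]
    have hLget : ∀ j (hj : j < kN + 1), L[j]'(by omega) = pvBest dp F m j := by
      intro j hj
      simp [hL]
    apply List.ext_getElem
    · simp [htn, List.length_zipWith, hlen, hLlen]
      omega
    · intro n h1 h2
      simp only [List.length_map, List.length_range] at h2
      simp only [htn, hfm]
      by_cases hn : n < m + 1
      · rw [List.getElem_append_left (by simp [hLlen]; omega)]
        simp only [List.getElem_take]
        rw [hLget n (by omega)]
        simp only [List.getElem_map, List.getElem_range]
        rw [pvBest, pvBest, show min (m + 1) n = min m n from by omega]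
      · rw [List.getElem_append_right (by simp [hLlen]; omega)]
        simp only [List.length_take, hLlen,
          Nat.min_eq_left (show m + 1 ≤ kN + 1 from by omega)]
        rw [List.getElem_zipWith]
        simp only [List.getElem_drop]
        simp only [show m + 1 + (n - (m + 1)) = n from by omega]
        rw [hLget n (by omega)]
        have hdpget : dp[n - (m + 1)]'(by omega) = dp.getD (n - (m + 1)) 0 := by
          simp [List.getD, List.getElem?_eq_getElem (show n - (m + 1) < dp.length by omega)]
        rw [hdpget]
        simp only [List.getElem_map, List.getElem_range]
        rw [pvBest, pvBest, show min (m + 1) n = (min m n) + 1 from by omega,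
            List.range_succ, List.foldl_append, List.foldl_cons, List.foldl_nil,
            show min m n = m from by omega]

theorem pv_solve_row_eq (kN Mt : Nat) (hMk : Mt ≤ kN) (v : List Int)
    (hv : v = [] ∨ Mt ≤ v.length) (dp : List Int) (hlen : dp.length = kN + 1) :
    pvSolveStep (Mt : Int) (pvRowGainsB v (Mt : Int)) dp = pvBStep kN Mt v dp := by
  rw [pvSolveStep, pvSolveStep_inv (pvRowGainsB v (Mt : Int)) dp kN hlen Mt hMk,
      pvBStep, B_row (pvRowGains v (Mt : Int)) Mt kN dp (pvRowGains_getD_zero v (Mt : Int))]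
  apply List.map_congr_left
  intro b hb
  apply pvBest_F_congr
  intro t ht1 htM
  rw [pvRowGainsB_getD v (Mt : Int) t ht1 (by exact_mod_cast htM)
        (Or.imp id (fun h => by exact_mod_cast h) hv),
      pvRowGains_getD v (Mt : Int) t ht1 (by exact_mod_cast htM)
        (Or.imp id (fun h => by exact_mod_cast h) hv)]

theorem solve_eq (kN Mt : Nat) (hMk : Mt ≤ kN) :
    ∀ (s : List (List Int)), (∀ v ∈ s, v = [] ∨ Mt ≤ v.length) →
      s.reverse.foldl (fun dp v => pvBStep kN Mt v dp) (List.replicate (kN + 1) (0 : Int))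
        = pvSolveB (kN : Int) (Mt : Int) (s.map (fun v => pvRowGainsB v (Mt : Int))) := by
  intro s
  induction s with
  | nil =>
    intro _
    rw [List.reverse_nil, List.foldl_nil, List.map_nil, pvSolveB,
        show ((kN : Int) + 1).toNat = kN + 1 from by omega]
  | cons x r ih =>
    intro hrow
    have hlen : (r.reverse.foldl (fun dp v => pvBStep kN Mt v dp)
        (List.replicate (kN + 1) (0 : Int))).length = kN + 1 := by
      generalize hdp0 : List.replicate (kN + 1) (0 : Int) = dp0
      have hdp0len : dp0.length = kN + 1 := by rw [← hdp0]; simp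
      clear hdp0
      induction r.reverse generalizing dp0 with
      | nil => simpa using hdp0len
      | cons y ys ihy =>
        rw [List.foldl_cons]
        exact ihy _ (pvBStep_length kN Mt y dp0)
    rw [List.reverse_cons, List.foldl_append, List.foldl_cons, List.foldl_nil,
        List.map_cons, pvSolveB,
        ← ih (fun v hv => hrow v (by simp [hv])),
        pv_solve_row_eq kN Mt hMk x (hrow x (by simp)) _ hlen]

-- ===== VERDICT (by name: the statement is the Claim_ definition above) =====

theorem MaxSumOfRemovedKConnerItemsFromMatrixRow_spec : Claim_equal_MaxSumOfRemovedKConnerItemsFromMatrixRow := by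
  unfold Claim_equal_MaxSumOfRemovedKConnerItemsFromMatrixRow
  intro matrix k _hdom hpre
  unfold Spec_MaxSumOfRemovedKConnerItemsFromMatrixRow
  by_cases hrows : (matrix.length : Int) = 0
  · simp only [MaxSumOfRemovedKConnerItemsFromMatrixRow,
      MaxSumOfRemovedKConnerItemsFromMatrixRow_alt]
    rw [if_pos hrows, if_pos hrows]
  · by_cases hcols : ((matrix.headD []).length : Int) = 0
    · simp only [MaxSumOfRemovedKConnerItemsFromMatrixRow,
        MaxSumOfRemovedKConnerItemsFromMatrixRow_alt]
      rw [if_neg hrows, if_neg hrows, if_pos hcols, if_pos hcols]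
    · have hne : matrix ≠ [] := fun h => hrows (by simp [h])
      have hhead : matrix.headD [] ≠ [] := fun h => hcols (by rw [h]; simp)
      obtain ⟨hk0, hkb, hrowcond⟩ :
          0 ≤ k ∧ k ≤ (matrix.length : Int) * ((matrix.headD []).length : Int) ∧
            ∀ v ∈ matrix, v = [] ∨ min ((matrix.headD []).length : Int) k ≤ (v.length : Int) := by
        rcases hpre with h | h | h
        · exact absurd h hne
        · exact absurd h hhead
        · exact h
      obtain ⟨kN, rfl⟩ : ∃ n : Nat, k = (n : Int) := ⟨k.toNat, (Int.toNat_of_nonneg hk0).symm⟩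
      simp only [MaxSumOfRemovedKConnerItemsFromMatrixRow,
        MaxSumOfRemovedKConnerItemsFromMatrixRow_alt]
      rw [if_neg hrows, if_neg hrows, if_neg hcols, if_neg hcols]
      rw [show min ((matrix.headD []).length : Int) (kN : Int)
            = ((min (matrix.headD []).length kN : Nat) : Int) from (Nat.cast_min _ _).symm]
      set Mt : Nat := min (matrix.headD []).length kN with hMt
      rw [show (fun i => (PySem.List.pyRange 0 ((Mt : Nat) : Int) 1).map
            (fun j => MaxSelectedKCornerItemItemFromArray (PySem.List.pyGetD matrix i []) (j + 1)))
          = ((fun v => (PySem.List.pyRange 0 ((Mt : Nat) : Int) 1).map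
            (fun j => MaxSelectedKCornerItemItemFromArray v (j + 1)))
              ∘ (fun i => PySem.List.pyGetD matrix i ([] : List Int))) from rfl,
          ← List.map_map, PySem.List.map_pyGetD_pyRange_zero']
      rw [show ((kN : Int) + 1).toNat = kN + 1 from by omega]
      rw [A_fold_convert kN Mt
            (matrix.map (fun v => (PySem.List.pyRange 0 ((Mt : Nat) : Int) 1).map
              (fun j => MaxSelectedKCornerItemItemFromArray v (j + 1))))
            (List.replicate (kN + 1) (0 : Int))]
      rw [List.foldl_map]
      have hvcond : ∀ v ∈ matrix, v = [] ∨ Mt ≤ v.length := by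
        intro v hv
        rcases hrowcond v hv with h | h
        · exact Or.inl h
        · right; rw [hMt]; omega
      have hfold : matrix.foldl (fun dp v => pvAStep kN Mt
            ((PySem.List.pyRange 0 ((Mt : Nat) : Int) 1).map
              (fun j => MaxSelectedKCornerItemItemFromArray v (j + 1))) dp)
            (List.replicate (kN + 1) (0 : Int))
          = matrix.foldl (fun dp v => pvBStep kN Mt v dp)
            (List.replicate (kN + 1) (0 : Int)) := by
        refine pv_foldl_eq matrix _ _ (fun dp => dp.length = kN + 1) ?_ ?_
            (List.replicate (kN + 1) (0 : Int)) (by simp)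
        · intro dp v hv hlen
          exact pv_row_eq kN Mt v (hvcond v hv) dp hlen
        · intro dp v hv hlen
          exact pvBStep_length kN Mt v dp
      rw [hfold]
      have hMk : Mt ≤ kN := by rw [hMt]; omega
      have hsolve := solve_eq kN Mt hMk matrix.reverse
        (fun v hv => hvcond v (by simpa using hv))
      rw [List.reverse_reverse] at hsolve
      rw [hsolve, ← List.map_reverse]
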